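-- pv_equiv track=rewrite | github.com/cilantrose/wordle-solver | main.py | findDist
-- ===== SOURCE A (Python) =====
-- def findDist(word_list, no_rep=False, char_only=True):
--     return_dict = {}
--     repeats = []
--     for word in word_list:
--         # initialize repeat tracker if option is enabled
--         if no_rep:
--             repeats = []
--         for c in word:
--             # assumes that numbers and punctuation may be included
--             if c.isalnum() or not char_only:
--                 # if the user has specified that it shouldn't count repeats then it skips the next step
--                 if no_rep is False or c not in repeats:
--                     return_dict[c] = return_dict[c] + 1 if c in return_dict else 1
--                     if no_rep:
--                         repeats.append(c)
--     return len(word_list), return_dict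
-- ===== SOURCE B (Python) =====
-- def findDist(word_list, no_rep=False, char_only=True):
--     # Phase 1: pool the characters to be tallied (per-word ordered dedup when no_rep).
--     pool = []
--     for word in word_list:
--         kept = [c for c in word if c.isalnum() or not char_only]
--         pool += list(dict.fromkeys(kept)) if no_rep else kept
--     # Phase 2: strike-out tally — repeatedly take the first remaining character,
--     # record how many times it occurs in the pool, and strike out all its copies.
--     result = {}
--     while pool:
--         c = pool[0]
--         result[c] = pool.count(c)
--         pool = [x for x in pool if x != c]
--     return len(word_list), result
-- ===== Notes on version B (the rewrite author's own statement) =====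
-- stated objective: alternative
-- what changed: A tallies inline: a nested word/char loop that increments a dict entry per character occurrence with a 'repeats' membership list; B first pools the countable characters (per-word ordered dedup when no_rep) and then tallies by successive extraction: repeatedly take the first remaining character, record its count in the pool, and strike all its copies out of the pool until it is empty.
import Mathlib
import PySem

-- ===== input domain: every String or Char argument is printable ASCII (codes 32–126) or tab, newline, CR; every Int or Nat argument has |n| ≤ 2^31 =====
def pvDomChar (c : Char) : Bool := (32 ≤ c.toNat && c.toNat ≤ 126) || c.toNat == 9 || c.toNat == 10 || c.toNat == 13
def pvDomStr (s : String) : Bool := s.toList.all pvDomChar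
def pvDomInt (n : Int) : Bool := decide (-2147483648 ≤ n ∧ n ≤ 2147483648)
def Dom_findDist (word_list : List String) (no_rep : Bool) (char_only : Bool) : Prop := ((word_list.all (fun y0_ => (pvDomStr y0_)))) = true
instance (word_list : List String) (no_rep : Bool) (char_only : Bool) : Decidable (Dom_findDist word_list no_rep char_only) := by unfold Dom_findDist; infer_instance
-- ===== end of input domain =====

-- B replaces A's inline nested dict/repeat-list accumulation by pool-then-strike-out tallying:
-- pool the countable characters, then repeatedly extract the first remaining character, record
-- its pool count, and strike out all its copies; alternative structure, same cost.

-- ===== PORT A =====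
def findDist (word_list : List String) (no_rep : Bool) (char_only : Bool) : Int × (List (String × Int)) :=
  let st :=
    word_list.foldl
      (fun (st : PySem.Dict String Int × List String) word =>
        -- 'if no_rep: repeats = []'
        let st := if no_rep then (st.1, ([] : List String)) else st
        word.toList.foldl
          (fun (st : PySem.Dict String Int × List String) c =>
            if PySem.Chars.isalnum c || !char_only then
              if no_rep == false || !(st.2.contains (String.singleton c)) then
                let d := st.1.insert (String.singleton c)
                  (if st.1.contains (String.singleton c) then st.1.getD (String.singleton c) 0 + 1 else 1)
                let r := if no_rep then st.2 ++ [String.singleton c] else st.2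
                (d, r)
              else st
            else st) st)
      (PySem.Dict.empty, ([] : List String))
  ((word_list.length : Int), st.1.items)

-- ===== PORT B =====
-- 'while pool: c = pool[0]; result[c] = pool.count(c); pool = [x for x in pool if x != c]'
def fdTallyGo (d : PySem.Dict String Int) (pool : List String) : PySem.Dict String Int :=
  match pool with
  | [] => d
  | c :: rest =>
    fdTallyGo (d.insert c (((c :: rest).count c : Int)))
      ((c :: rest).filter (fun x => !(x == c)))
termination_by pool.length
decreasing_by
  simp only [List.filter_cons, beq_self_eq_true, Bool.not_true, List.length_cons]
  exact Nat.lt_succ_of_le (List.length_filter_le _ _)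

def findDist_alt (word_list : List String) (no_rep : Bool) (char_only : Bool) : Int × (List (String × Int)) :=
  let pool :=
    word_list.foldl
      (fun (acc : List String) word =>
        let kept := (word.toList.filter (fun c => PySem.Chars.isalnum c || !char_only)).map
          (fun c => String.singleton c)
        acc ++ (if no_rep then PySem.List.dedup kept else kept)) []
  ((word_list.length : Int), (fdTallyGo PySem.Dict.empty pool).items)

-- ===== PRECONDITION & SPEC =====
def Spec_findDist (word_list : List String) (no_rep : Bool) (char_only : Bool) (out : Int × (List (String × Int))) : Prop := out = findDist_alt word_list no_rep char_only
instance (word_list : List String) (no_rep : Bool) (char_only : Bool) (out : Int × (List (String × Int))) : Decidable (Spec_findDist word_list no_rep char_only out) := by unfold Spec_findDist; infer_instance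

-- ===== CLAIM (what is proved, stated in full; the proofs are below) =====
def Claim_equal_findDist : Prop := ∀ (word_list : List String) (no_rep : Bool) (char_only : Bool), Dom_findDist word_list no_rep char_only → Spec_findDist word_list no_rep char_only (findDist word_list no_rep char_only)

-- ===== LEMMAS AND PROOFS =====

def fdInc (d : PySem.Dict String Int) (k : String) : PySem.Dict String Int :=
  d.insert k (if d.contains k then d.getD k 0 + 1 else 1)
lemma fdInc_eq (d : PySem.Dict String Int) (k : String) :
    fdInc d k = d.insert k (d.getD k 0 + 1) := by
  unfold fdInc
  cases h : d.contains k with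
  | true => rfl
  | false => simp [PySem.Dict.getD_of_not_contains d 0 h]
lemma fdInc_keys (d : PySem.Dict String Int) (k : String) :
    (fdInc d k).keys = PySem.Set.add d.keys k := by
  rw [fdInc_eq]
  by_cases h : d.contains k = true
  · rw [PySem.Dict.keys_insert_of_contains _ _ h]
    have : k ∈ d.keys := (PySem.Dict.contains_iff_mem_keys d k).1 h
    simp [PySem.Set.add, PySem.Set.contains_iff, this]
  · rw [PySem.Dict.keys_insert_of_not_contains _ _ (by simpa using h)]
    have : k ∉ d.keys := fun hm => h ((PySem.Dict.contains_iff_mem_keys d k).2 hm)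
    simp [PySem.Set.add, PySem.Set.contains_iff, this]
lemma fd_update_subset (s r : PySem.Set String) (h : ∀ x ∈ s, x ∈ r) :
    PySem.Set.update r s = r := by
  induction s generalizing r with
  | nil => rfl
  | cons x s ih =>
    have hx : x ∈ r := h x (by simp)
    show PySem.Set.update (PySem.Set.add r x) s = r
    rw [show PySem.Set.add r x = r by simp [PySem.Set.add, PySem.Set.contains_iff, hx]]
    exact ih r (fun y hy => h y (by simp [hy]))
lemma fd_foldl_add_append (ks : List String) : ∀ (s : PySem.Set String),
    ∃ t, ks.foldl PySem.Set.add s = s ++ t := by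
  induction ks with
  | nil => exact fun s => ⟨[], by simp⟩
  | cons k ks ih =>
    intro s
    rcases ih (PySem.Set.add s k) with ⟨t, ht⟩
    by_cases h : k ∈ s
    · exact ⟨t, by rw [List.foldl_cons, ht, show PySem.Set.add s k = s by simp [PySem.Set.add, h]]⟩
    · refine ⟨[k] ++ t, ?_⟩
      rw [List.foldl_cons, ht, show PySem.Set.add s k = s ++ [k] by simp [PySem.Set.add, h], List.append_assoc]
lemma fd_update_foldl_add (ks : List String) : ∀ (s r : PySem.Set String), (∀ x ∈ s, x ∈ r) →
    PySem.Set.update r (ks.foldl PySem.Set.add s) = PySem.Set.update r ks := by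
  induction ks with
  | nil => intro s r h; exact fd_update_subset s r h
  | cons k ks ih =>
    intro s r h
    show PySem.Set.update r (ks.foldl PySem.Set.add (PySem.Set.add s k)) = PySem.Set.update (PySem.Set.add r k) ks
    by_cases hs : k ∈ s
    · rw [show PySem.Set.add s k = s by simp [PySem.Set.add, PySem.Set.contains_iff, hs]]
      rw [show PySem.Set.add r k = r by simp [PySem.Set.add, PySem.Set.contains_iff, h k hs]]
      exact ih s r h
    · rw [show PySem.Set.add s k = s ++ [k] by simp [PySem.Set.add, PySem.Set.contains_iff, hs]]
      by_cases hr : k ∈ r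
      · rw [show PySem.Set.add r k = r by simp [PySem.Set.add, PySem.Set.contains_iff, hr]]
        have hsub : ∀ x ∈ s ++ [k], x ∈ r := by
          intro x hx
          rcases List.mem_append.1 hx with hx | hx
          · exact h x hx
          · simp at hx; subst hx; exact hr
        exact ih (s ++ [k]) r hsub
      · rw [show PySem.Set.add r k = r ++ [k] by simp [PySem.Set.add, PySem.Set.contains_iff, hr]]
        have hsub : ∀ x ∈ s ++ [k], x ∈ r ++ [k] := by
          intro x hx; rcases List.mem_append.1 hx with hx | hx
          · exact List.mem_append.2 (Or.inl (h x hx))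
          · exact List.mem_append.2 (Or.inr hx)
        rcases fd_foldl_add_append ks (s ++ [k]) with ⟨t, ht⟩
        rw [ht]
        have e1 : PySem.Set.update r (s ++ [k] ++ t)
            = PySem.Set.update (PySem.Set.update r (s ++ [k])) t := by
          show (s ++ [k] ++ t).foldl PySem.Set.add r = _
          rw [List.foldl_append]; rfl
        have e2 : PySem.Set.update r (s ++ [k]) = r ++ [k] := by
          show (s ++ [k]).foldl PySem.Set.add r = r ++ [k]
          rw [List.foldl_append]
          rw [show s.foldl PySem.Set.add r = PySem.Set.update r s from rfl, fd_update_subset s r h]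
          simp [PySem.Set.add, PySem.Set.contains_iff, hr]
        rw [e1, e2, show PySem.Set.update (r ++ [k]) t = PySem.Set.update (r++[k]) ([] ++ t) by simp]
        have e3 := ih (s ++ [k]) (r ++ [k]) hsub
        rw [ht] at e3
        have e4 : PySem.Set.update (r ++ [k]) (s ++ [k] ++ t)
            = PySem.Set.update (PySem.Set.update (r ++ [k]) (s ++ [k])) t := by
          show (s ++ [k] ++ t).foldl PySem.Set.add (r ++ [k]) = _
          rw [List.foldl_append]; rfl
        rw [e4, fd_update_subset (s ++ [k]) (r ++ [k]) hsub] at e3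
        simpa using e3
lemma fd_update_dedup (ks : List String) (r : PySem.Set String) :
    PySem.Set.update r (PySem.List.dedup ks) = PySem.Set.update r ks := by
  rw [PySem.List.dedup_eq_ofList, PySem.Set.ofList_eq_foldl]
  exact fd_update_foldl_add ks [] r (by simp)
lemma fd_dedup_count (ks : List String) (v : String) :
    ((PySem.List.dedup ks).count v : Int) = if v ∈ ks then 1 else 0 := by
  by_cases h : v ∈ ks
  · rw [List.count_eq_one_of_mem (by simpa using PySem.List.nodup_dedup ks) (by simp [PySem.List.mem_dedup, h])]
    simp [h]
  · rw [List.count_eq_zero_of_not_mem (by simp [PySem.List.mem_dedup, h])]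
    simp [h]
def fdStepT (st : PySem.Dict String Int × List String) (k : String) :
    PySem.Dict String Int × List String :=
  if !(st.2.contains k) then (fdInc st.1 k, st.2 ++ [k]) else st
def fdStepF (st : PySem.Dict String Int × List String) (k : String) :
    PySem.Dict String Int × List String :=
  (fdInc st.1 k, st.2)
lemma fdInc_getD (d : PySem.Dict String Int) (k v : String) :
    (fdInc d k).getD v 0 = if v = k then d.getD k 0 + 1 else d.getD v 0 := by
  rw [fdInc_eq, PySem.Dict.getD_insert]
lemma fd_innerT (ks : List String) : ∀ (d : PySem.Dict String Int) (r : List String),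
    (∀ x ∈ r, x ∈ d.keys) →
    (ks.foldl fdStepT (d, r)).1.keys = PySem.Set.update d.keys ks
    ∧ (∀ v, (ks.foldl fdStepT (d, r)).1.getD v 0
        = d.getD v 0 + (if v ∈ ks ∧ v ∉ r then 1 else 0))
    ∧ (∀ x ∈ (ks.foldl fdStepT (d, r)).2, x ∈ (ks.foldl fdStepT (d, r)).1.keys) := by
  induction ks with
  | nil =>
    intro d r h
    refine ⟨rfl, fun v => by simp, h⟩
  | cons k ks ih =>
    intro d r h
    rw [List.foldl_cons]
    by_cases hk : k ∈ r
    · have hstep : fdStepT (d, r) k = (d, r) := by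
        simp [fdStepT, hk]
      rw [hstep]
      obtain ⟨h1, h2, h3⟩ := ih d r h
      refine ⟨?_, ?_, h3⟩
      · rw [h1]
        show _ = PySem.Set.update (PySem.Set.add d.keys k) ks
        rw [show PySem.Set.add d.keys k = d.keys by simp [PySem.Set.add, h k hk]]
      · intro v
        rw [h2 v]
        by_cases hv : v = k
        · subst hv; simp [hk]
        · simp [hv]
    · have hstep : fdStepT (d, r) k = (fdInc d k, r ++ [k]) := by
        simp [fdStepT, hk]
      rw [hstep]
      have hinv : ∀ x ∈ r ++ [k], x ∈ (fdInc d k).keys := by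
        intro x hx
        rw [fdInc_keys]
        rcases List.mem_append.1 hx with hx | hx
        · exact PySem.Set.mem_add _ _ _ |>.2 (Or.inl (h x hx))
        · simp at hx; subst hx; exact PySem.Set.mem_add _ _ _ |>.2 (Or.inr rfl)
      obtain ⟨h1, h2, h3⟩ := ih (fdInc d k) (r ++ [k]) hinv
      refine ⟨?_, ?_, h3⟩
      · rw [h1, fdInc_keys]; rfl
      · intro v
        rw [h2 v, fdInc_getD]
        by_cases hv : v = k
        · subst hv; simp [hk]
        · simp [hv]
lemma fd_innerF (ks : List String) : ∀ (d : PySem.Dict String Int) (r : List String),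
    (ks.foldl fdStepF (d, r)).1.keys = PySem.Set.update d.keys ks
    ∧ (∀ v, (ks.foldl fdStepF (d, r)).1.getD v 0 = d.getD v 0 + (ks.count v : Int))
    ∧ (ks.foldl fdStepF (d, r)).2 = r := by
  induction ks with
  | nil => exact fun d r => ⟨rfl, fun v => by simp, rfl⟩
  | cons k ks ih =>
    intro d r
    rw [List.foldl_cons, show fdStepF (d, r) k = (fdInc d k, r) from rfl]
    obtain ⟨h1, h2, h3⟩ := ih (fdInc d k) r
    refine ⟨by rw [h1, fdInc_keys]; rfl, ?_, h3⟩
    intro v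
    rw [h2 v, fdInc_getD, List.count_cons]
    by_cases hv : v = k
    · subst hv; simp; push_cast; ring
    · have hv' : ¬ (k = v) := fun h => hv h.symm
      simp [hv, hv']
def fdKeys (char_only : Bool) (w : String) : List String :=
  (w.toList.filter (fun c => PySem.Chars.isalnum c || !char_only)).map (fun c => String.singleton c)
lemma fd_globalF (co : Bool) (wl : List String) : ∀ (d : PySem.Dict String Int) (r : List String),
    (wl.foldl (fun st w => (fdKeys co w).foldl fdStepF st) (d, r)).1.keys
      = PySem.Set.update d.keys (wl.flatMap (fdKeys co))
    ∧ ∀ v, (wl.foldl (fun st w => (fdKeys co w).foldl fdStepF st) (d, r)).1.getD v 0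
      = d.getD v 0 + ((wl.flatMap (fdKeys co)).count v : Int) := by
  induction wl with
  | nil => exact fun d r => ⟨by simp [PySem.Set.update], fun v => by simp⟩
  | cons w wl ih =>
    intro d r
    rw [List.foldl_cons]
    obtain ⟨k1, k2, k3⟩ := fd_innerF (fdKeys co w) d r
    have hpair : (fdKeys co w).foldl fdStepF (d, r)
        = (((fdKeys co w).foldl fdStepF (d, r)).1, r) := by
      exact Prod.ext rfl k3
    rw [hpair]
    obtain ⟨g1, g2⟩ := ih ((fdKeys co w).foldl fdStepF (d, r)).1 r
    constructor
    · rw [g1, k1, List.flatMap_cons]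
      show PySem.Set.update _ _ = (fdKeys co w ++ wl.flatMap (fdKeys co)).foldl PySem.Set.add d.keys
      rw [List.foldl_append]
      rfl
    · intro v
      rw [g2 v, k2 v, List.flatMap_cons, List.count_append]
      push_cast; ring
lemma fd_globalT (co : Bool) (wl : List String) : ∀ (d : PySem.Dict String Int) (r : List String),
    (wl.foldl (fun st w => (fdKeys co w).foldl fdStepT (st.1, ([] : List String))) (d, r)).1.keys
      = PySem.Set.update d.keys (wl.flatMap (fdKeys co))
    ∧ ∀ v, (wl.foldl (fun st w => (fdKeys co w).foldl fdStepT (st.1, ([] : List String))) (d, r)).1.getD v 0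
      = d.getD v 0 + ((wl.flatMap (fun w => PySem.List.dedup (fdKeys co w))).count v : Int) := by
  induction wl with
  | nil => exact fun d r => ⟨by simp [PySem.Set.update], fun v => by simp⟩
  | cons w wl ih =>
    intro d r
    rw [List.foldl_cons]
    obtain ⟨k1, k2, _⟩ := fd_innerT (fdKeys co w) d [] (by simp)
    obtain ⟨g1, g2⟩ := ih ((fdKeys co w).foldl fdStepT (d, [])).1
      ((fdKeys co w).foldl fdStepT (d, [])).2
    constructor
    · rw [g1, k1, List.flatMap_cons]
      show PySem.Set.update _ _ = (fdKeys co w ++ wl.flatMap (fdKeys co)).foldl PySem.Set.add d.keys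
      rw [List.foldl_append]
      rfl
    · intro v
      rw [g2 v, k2 v, List.flatMap_cons, List.count_append]
      have : ((PySem.List.dedup (fdKeys co w)).count v : Int) = if v ∈ fdKeys co w then 1 else 0 :=
        fd_dedup_count _ _
      push_cast
      rw [this]
      simp only [List.not_mem_nil, not_false_iff, and_true]
      ring
lemma fd_update_flat_dedup (co : Bool) (wl : List String) : ∀ (r : PySem.Set String),
    PySem.Set.update r (wl.flatMap (fun w => PySem.List.dedup (fdKeys co w)))
      = PySem.Set.update r (wl.flatMap (fdKeys co)) := by
  induction wl with
  | nil => intro r; rfl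
  | cons w wl ih =>
    intro r
    rw [List.flatMap_cons, List.flatMap_cons]
    show (PySem.List.dedup (fdKeys co w) ++ _).foldl PySem.Set.add r
      = (fdKeys co w ++ _).foldl PySem.Set.add r
    rw [List.foldl_append, List.foldl_append]
    have e1 : (PySem.List.dedup (fdKeys co w)).foldl PySem.Set.add r
        = (fdKeys co w).foldl PySem.Set.add r := fd_update_dedup (fdKeys co w) r
    rw [e1]
    exact ih _
lemma fd_inner_convF (co : Bool) (w : String) (st : PySem.Dict String Int × List String) :
    w.toList.foldl (fun st c => if PySem.Chars.isalnum c || !co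
        then fdStepF st (String.singleton c) else st) st
      = (fdKeys co w).foldl fdStepF st := by
  rw [PySem.List.foldl_if_eq_foldl_filter (fun c => PySem.Chars.isalnum c || !co)
        (fun st c => fdStepF st (String.singleton c))]
  rw [fdKeys, List.foldl_map]

lemma fd_inner_convT (co : Bool) (w : String) (st : PySem.Dict String Int × List String) :
    w.toList.foldl (fun st c => if PySem.Chars.isalnum c || !co
        then fdStepT st (String.singleton c) else st) st
      = (fdKeys co w).foldl fdStepT st := by
  rw [PySem.List.foldl_if_eq_foldl_filter (fun c => PySem.Chars.isalnum c || !co)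
        (fun st c => fdStepT st (String.singleton c))]
  rw [fdKeys, List.foldl_map]

-- B-side: set(filter) commutes with filter(set)
lemma fd_ofList_filter (p : String → Bool) (l : List String) :
    PySem.Set.ofList (l.filter p) = (PySem.Set.ofList l).filter p := by
  induction l with
  | nil => rfl
  | cons x l ih =>
    by_cases hx : p x = true
    · rw [List.filter_cons_of_pos hx, PySem.Set.ofList_cons, PySem.Set.ofList_cons,
        List.filter_cons_of_pos hx, ih]
      congr 1
      simp only [PySem.Set.discard]
      rw [List.filter_filter, List.filter_filter]
      apply List.filter_congr
      intro y _
      simp [Bool.and_comm]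
    · rw [List.filter_cons_of_neg (by simpa using hx), ih, PySem.Set.ofList_cons,
        List.filter_cons_of_neg (by simpa using hx)]
      simp only [PySem.Set.discard]
      rw [List.filter_filter]
      apply List.filter_congr
      intro y _
      by_cases hyx : y = x
      · subst hyx; simp_all
      · simp [hyx]

-- the strike-out tally loop produces one entry per distinct pool element,
-- in first-encounter order, carrying the pool count
lemma fd_tallyGo_items (n : Nat) : ∀ (pool : List String) (d : PySem.Dict String Int),
    pool.length ≤ n → (∀ x ∈ pool, d.contains x = false) →
    (fdTallyGo d pool).items
      = d.items ++ (PySem.Set.ofList pool).map (fun c => (c, (pool.count c : Int))) := by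
  induction n with
  | zero =>
    intro pool d hlen _
    have : pool = [] := List.length_eq_zero_iff.1 (Nat.le_zero.1 hlen)
    subst this
    simp [fdTallyGo, PySem.Set.ofList_nil]
  | succ n ih =>
    intro pool d hlen hfresh
    match pool with
    | [] => simp [fdTallyGo, PySem.Set.ofList_nil]
    | c :: rest =>
      rw [fdTallyGo]
      have hc : d.contains c = false := hfresh c (by simp)
      set pool' := (c :: rest).filter (fun x => !(x == c)) with hpool'
      have hpool'' : pool' = rest.filter (fun x => !(x == c)) := by
        rw [hpool', List.filter_cons]
        simp
      have hlen' : pool'.length ≤ n := by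
        rw [hpool'']
        exact Nat.le_of_lt_succ (Nat.lt_succ_of_le (Nat.le_trans (List.length_filter_le _ _)
          (Nat.le_of_succ_le_succ hlen)))
      have hfresh' : ∀ x ∈ pool', (d.insert c (((c :: rest).count c : Int))).contains x = false := by
        intro x hx
        rw [hpool'] at hx
        have hxm := List.mem_of_mem_filter hx
        have hxne : (x == c) = false := by
          have := List.of_mem_filter hx
          simpa using this
        rw [PySem.Dict.contains_insert]
        simp only [hxne, Bool.false_or]
        exact hfresh x hxm
      rw [ih pool' (d.insert c (((c :: rest).count c : Int))) hlen' hfresh']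
      rw [PySem.Dict.items_insert_of_not_contains d _ hc]
      rw [List.append_assoc]
      congr 1
      -- [(c, count)] ++ map over set(pool') = map over set(c :: rest)
      rw [PySem.Set.ofList_cons, List.map_cons]
      show (c, ((c :: rest).count c : Int)) :: (PySem.Set.ofList pool').map _
          = (c, ((c :: rest).count c : Int)) :: ((PySem.Set.ofList rest).discard c).map _
      congr 1
      rw [hpool'', fd_ofList_filter]
      simp only [PySem.Set.discard]
      apply List.map_congr_left
      intro c' hc'
      have hne : (c' == c) = false := by
        have := List.of_mem_filter hc'
        simpa using this
      have h1 : List.count c' (List.filter (fun x => !(x == c)) rest) = List.count c' rest :=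
        List.count_filter (by simpa using hne)
      have h2 : List.count c' (c :: rest) = List.count c' rest := by
        have hcc : ¬ c = c' := fun h => by subst h; simp at hne
        rw [List.count_cons]; simp [hcc]
      rw [h1, h2]

lemma fd_tally_items (pool : List String) :
    (fdTallyGo PySem.Dict.empty pool).items
      = (PySem.Set.ofList pool).map (fun c => (c, (pool.count c : Int))) := by
  have := fd_tallyGo_items pool.length pool PySem.Dict.empty (Nat.le_refl _)
    (fun x _ => PySem.Dict.contains_empty x)
  simpa using this

lemma fd_mainF : ∀ wl co, findDist wl false co = findDist_alt wl false co := by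
  intro wl co
  have hA : findDist wl false co = ((wl.length : Int),
      (wl.foldl (fun st w => w.toList.foldl (fun st c => if PySem.Chars.isalnum c || !co
          then fdStepF st (String.singleton c) else st) st)
        ((PySem.Dict.empty : PySem.Dict String Int), ([] : List String))).1.items) := rfl
  have hB : findDist_alt wl false co = ((wl.length : Int),
      (fdTallyGo PySem.Dict.empty (wl.foldl (fun acc w => acc ++ fdKeys co w) [])).items) := rfl
  rw [hA, hB, fd_tally_items]
  have hconv : (wl.foldl (fun st w => w.toList.foldl (fun st c => if PySem.Chars.isalnum c || !co
          then fdStepF st (String.singleton c) else st) st)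
        ((PySem.Dict.empty : PySem.Dict String Int), ([] : List String)))
      = wl.foldl (fun st w => (fdKeys co w).foldl fdStepF st)
        ((PySem.Dict.empty : PySem.Dict String Int), ([] : List String)) := by
    apply PySem.List.foldl_congr_mem
    intro acc w _
    exact fd_inner_convF co w acc
  rw [hconv]
  have hchars : wl.foldl (fun acc w => acc ++ fdKeys co w) ([] : List String)
      = wl.flatMap (fdKeys co) := by
    rw [PySem.List.foldl_append_eq_flatMap]; simp
  rw [hchars]
  obtain ⟨g1, g2⟩ := fd_globalF co wl PySem.Dict.empty []
  set dA := (wl.foldl (fun st w => (fdKeys co w).foldl fdStepF st)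
        ((PySem.Dict.empty : PySem.Dict String Int), ([] : List String))).1 with hdA
  have hkeys : dA.keys = PySem.Set.ofList (wl.flatMap (fdKeys co)) := by
    rw [g1]
    rw [← PySem.Set.update_nil_left]
    simp [PySem.Dict.keys_empty]
  have hnd : dA.keys.Nodup := by
    rw [hkeys]; exact PySem.Set.nodup_ofList _
  have hgetD : ∀ v, dA.getD v 0 = ((wl.flatMap (fdKeys co)).count v : Int) := by
    intro v; rw [g2 v]; simp
  rw [PySem.Dict.items_eq_map_keys dA hnd 0, hkeys]
  refine congrArg _ ?_
  apply List.map_congr_left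
  intro k _
  rw [hgetD k]
lemma fd_mainT : ∀ wl co, findDist wl true co = findDist_alt wl true co := by
  intro wl co
  have hA : findDist wl true co = ((wl.length : Int),
      (wl.foldl (fun st w => w.toList.foldl (fun st c => if PySem.Chars.isalnum c || !co
          then fdStepT st (String.singleton c) else st) (st.1, ([] : List String)))
        ((PySem.Dict.empty : PySem.Dict String Int), ([] : List String))).1.items) := rfl
  have hB : findDist_alt wl true co = ((wl.length : Int),
      (fdTallyGo PySem.Dict.empty
        (wl.foldl (fun acc w => acc ++ PySem.List.dedup (fdKeys co w)) [])).items) := rfl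
  rw [hA, hB, fd_tally_items]
  have hconv : (wl.foldl (fun st w => w.toList.foldl (fun st c => if PySem.Chars.isalnum c || !co
          then fdStepT st (String.singleton c) else st) (st.1, ([] : List String)))
        ((PySem.Dict.empty : PySem.Dict String Int), ([] : List String)))
      = wl.foldl (fun st w => (fdKeys co w).foldl fdStepT (st.1, ([] : List String)))
        ((PySem.Dict.empty : PySem.Dict String Int), ([] : List String)) := by
    apply PySem.List.foldl_congr_mem
    intro acc w _
    exact fd_inner_convT co w (acc.1, [])
  rw [hconv]
  have hchars : wl.foldl (fun acc w => acc ++ PySem.List.dedup (fdKeys co w)) ([] : List String)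
      = wl.flatMap (fun w => PySem.List.dedup (fdKeys co w)) := by
    rw [PySem.List.foldl_append_eq_flatMap]; simp
  rw [hchars]
  obtain ⟨g1, g2⟩ := fd_globalT co wl PySem.Dict.empty []
  set dA := (wl.foldl (fun st w => (fdKeys co w).foldl fdStepT (st.1, ([] : List String)))
        ((PySem.Dict.empty : PySem.Dict String Int), ([] : List String))).1 with hdA
  have hkeys : dA.keys = PySem.Set.ofList (wl.flatMap (fun w => PySem.List.dedup (fdKeys co w))) := by
    rw [g1]
    have : PySem.Set.ofList (wl.flatMap (fun w => PySem.List.dedup (fdKeys co w)))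
        = PySem.Set.update [] (wl.flatMap (fun w => PySem.List.dedup (fdKeys co w))) := by
      rw [PySem.Set.update_nil_left]
    rw [this, fd_update_flat_dedup]
    simp [PySem.Dict.keys_empty]
  have hnd : dA.keys.Nodup := by
    rw [hkeys]; exact PySem.Set.nodup_ofList _
  have hgetD : ∀ v, dA.getD v 0
      = ((wl.flatMap (fun w => PySem.List.dedup (fdKeys co w))).count v : Int) := by
    intro v; rw [g2 v]; simp
  rw [PySem.Dict.items_eq_map_keys dA hnd 0, hkeys]
  refine congrArg _ ?_
  apply List.map_congr_left
  intro k _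
  rw [hgetD k]

-- ===== VERDICT (by name: the statement is the Claim_ definition above) =====
theorem findDist_spec : Claim_equal_findDist := by
  intro word_list no_rep char_only _
  unfold Spec_findDist
  cases no_rep
  · exact fd_mainF word_list char_only
  · exact fd_mainT word_list char_only
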